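-- pv_equiv track=rewrite | github.com/colabyh/fastapi-docker-heroku | app/xor_base64.py | smart_xorkeys_top_printable
-- ===== SOURCE A (Python) =====
-- import itertools
--
-- def smart_xorkeys_top_printable(input_xored, test_key_len, check_top, charset):
-- #key_len in bytes
--   possible = [set(range(256)) for _ in range(test_key_len)]
--   key_success_count = [[0]*256 for _ in range(test_key_len)]
--
--   for i, char in enumerate(input_xored):
--
--     for j, possible_key in enumerate(possible[i % test_key_len]):
--       decoded = char ^ possible_key
--       if decoded in charset:
--         key_success_count[i % test_key_len][j] += 1
--
--   top_list = []
--   srt = []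
--   for c in range(test_key_len):
--     srt.append(sorted(range(256), key=lambda k: key_success_count[c][k], reverse = True))
--     top_list.append(srt[-1][:check_top])
--
--   return list(itertools.product(*top_list))
-- ===== SOURCE B (Python) =====
-- # B: per-position histogram of input values, key counts derived via charset offsets
-- # (k = value ^ c), negated-key stable sort, and a back-to-front cartesian product
-- # instead of scanning all 256 keys for every input byte.
-- def smart_xorkeys_top_printable(input_xored, test_key_len, check_top, charset):
--     cs = set(charset)
--     hists = [{} for _ in range(max(test_key_len, 0))]
--     for i, ch in enumerate(input_xored):
--         h = hists[i % test_key_len]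
--         h[ch] = h.get(ch, 0) + 1
--     top_list = []
--     for h in hists:
--         counts = [0] * 256
--         for v, m in h.items():
--             for c in cs:
--                 k = v ^ c
--                 if 0 <= k < 256:
--                     counts[k] += m
--         order = sorted(range(256), key=lambda k: -counts[k])
--         top_list.append(order[:check_top])
--     prod = [()]
--     for tops in reversed(top_list):
--         prod = [(k,) + t for k in tops for t in prod]
--     return prod
-- ===== Notes on version B (the rewrite author's own statement) =====
-- stated objective: faster
-- what changed: Instead of scanning all 256 candidate keys for every input byte and testing each decode against the charset list, B builds one histogram dict of input values per key position and derives each key's success count through charset offsets (k = value ^ c), then sorts with a negated key instead of reverse=True and builds the cartesian product back-to-front from tuples instead of itertools.product.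
-- outside the precondition, e.g. on smart_xorkeys_top_printable([1], 0, 3, {1}): A raises ZeroDivisionError, B raises ZeroDivisionError; on smart_xorkeys_top_printable([1], -2, 3, {1}): A raises IndexError, B raises IndexError
import Mathlib
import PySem

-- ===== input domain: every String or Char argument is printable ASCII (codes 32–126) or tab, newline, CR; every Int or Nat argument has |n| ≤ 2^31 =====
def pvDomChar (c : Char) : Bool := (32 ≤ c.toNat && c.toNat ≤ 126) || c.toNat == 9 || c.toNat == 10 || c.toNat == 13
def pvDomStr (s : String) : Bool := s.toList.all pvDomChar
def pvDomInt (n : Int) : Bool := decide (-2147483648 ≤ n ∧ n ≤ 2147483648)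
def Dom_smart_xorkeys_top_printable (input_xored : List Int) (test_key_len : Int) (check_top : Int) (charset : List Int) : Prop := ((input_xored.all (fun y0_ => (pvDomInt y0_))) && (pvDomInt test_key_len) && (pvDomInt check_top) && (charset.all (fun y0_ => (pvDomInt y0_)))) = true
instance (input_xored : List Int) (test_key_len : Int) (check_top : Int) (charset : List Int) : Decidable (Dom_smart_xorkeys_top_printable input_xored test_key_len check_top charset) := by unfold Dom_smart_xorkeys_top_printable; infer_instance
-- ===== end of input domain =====

-- B replaces A's scan of all 256 candidate keys for every input byte by a per-position
-- histogram of input values whose key counts are derived through charset offsets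
-- (k = value ^ c), a negated-key stable sort instead of reverse=True, and a
-- back-to-front cartesian product instead of itertools.product.

-- ===== PORT A =====
-- CPython iterates set(range(256)) in increasing numeric order (small-int hashing),
-- which is exactly its insertion order, so enumerating the PySem.Set's list is exact here.
-- pyGetD is used where Python indexes lists: the defaults are only reachable outside Pre_.
def smart_xorkeys_top_printable (input_xored : List Int) (test_key_len : Int) (check_top : Int) (charset : List Int) : List (List Int) :=
  -- possible = [set(range(256)) for _ in range(test_key_len)]
  let possible : List (PySem.Set Int) :=
    (PySem.List.pyRange 0 test_key_len).map (fun _ => PySem.Set.ofList (PySem.List.pyRange 0 256))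
  -- key_success_count = [[0]*256 for _ in range(test_key_len)]
  -- (Python lists are mutable O(1)-indexed sequences; Array models them exactly,
  --  all indexing below is in range wherever Python's is)
  let ksc0 : Array (Array Int) :=
    ((PySem.List.pyRange 0 test_key_len).map (fun _ => Array.replicate 256 (0 : Int))).toArray
  -- the main double loop
  let ksc : Array (Array Int) :=
    (PySem.List.enumerate input_xored 0).foldl
      (fun T p =>
        (PySem.List.enumerate (PySem.List.pyGetD possible (PySem.Int.mod p.1 test_key_len) []) 0).foldl
          (fun T q =>
            if charset.contains (PySem.Int.bxor p.2 q.2) then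
              T.modify (PySem.Int.mod p.1 test_key_len).toNat
                (fun row => row.modify q.1.toNat (fun x => x + 1))
            else T)
          T)
      ksc0
  -- the srt/top_list loop (srt[-1] is the element just appended)
  let st :=
    (PySem.List.pyRange 0 test_key_len).foldl
      (fun st c =>
        let srt := st.1 ++ [PySem.List.sorted (PySem.List.pyRange 0 256)
            (fun k => (ksc.getD c.toNat #[]).getD k.toNat 0) true]
        (srt, st.2 ++ [PySem.List.slice (PySem.List.pyGetD srt (-1) []) none (some check_top)]))
      (([] : List (List Int)), ([] : List (List Int)))
  -- list(itertools.product(*top_list))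
  st.2.foldl (fun acc xs => acc.flatMap (fun t => xs.map (fun x => t ++ [x]))) [[]]

-- ===== PORT B =====
def smart_xorkeys_top_printable_alt (input_xored : List Int) (test_key_len : Int) (check_top : Int) (charset : List Int) : List (List Int) :=
  let cs : PySem.Set Int := PySem.Set.ofList charset
  let hists0 : List (PySem.Dict Int Int) :=
    (PySem.List.pyRange 0 (max test_key_len 0)).map (fun _ => PySem.Dict.empty)
  -- per-position histogram of input values
  let hists : List (PySem.Dict Int Int) :=
    (PySem.List.enumerate input_xored 0).foldl
      (fun hs p =>
        hs.modify (PySem.Int.mod p.1 test_key_len).toNat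
          (fun h => h.insert p.2 (h.getD p.2 0 + 1)))
      hists0
  let top_list : List (List Int) :=
    hists.foldl
      (fun acc h =>
        let counts : Array Int :=
          h.items.foldl
            (fun counts vm =>
              cs.foldl
                (fun counts c =>
                  let k := PySem.Int.bxor vm.1 c
                  if 0 ≤ k ∧ k < 256 then counts.modify k.toNat (fun x => x + vm.2) else counts)
                counts)
            (Array.replicate 256 (0 : Int))
        let order := PySem.List.sorted (PySem.List.pyRange 0 256)
            (fun k => -(counts.getD k.toNat 0)) false
        acc ++ [PySem.List.slice order none (some check_top)])
      []
  -- cartesian product, built back-to-front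
  top_list.reverse.foldl
    (fun prod tops => tops.flatMap (fun k => prod.map (fun t => k :: t)))
    [[]]

-- ===== PRECONDITION & SPEC =====
-- Pre_ excludes exactly the inputs on which Python A raises: a nonempty input with
-- test_key_len ≤ 0 (ZeroDivisionError at 0, IndexError for negative lengths).
def Pre_smart_xorkeys_top_printable (input_xored : List Int) (test_key_len : Int) (check_top : Int) (charset : List Int) : Prop :=
  0 < test_key_len ∨ input_xored = []
instance (input_xored : List Int) (test_key_len : Int) (check_top : Int) (charset : List Int) : Decidable (Pre_smart_xorkeys_top_printable input_xored test_key_len check_top charset) := by unfold Pre_smart_xorkeys_top_printable; infer_instance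

def pvWitness_smart_xorkeys_top_printable : List Int × Int × Int × List Int := ([5, 6, 7], 2, 2, [1, 2, 3])

def Spec_smart_xorkeys_top_printable (input_xored : List Int) (test_key_len : Int) (check_top : Int) (charset : List Int) (out : List (List Int)) : Prop := out = smart_xorkeys_top_printable_alt input_xored test_key_len check_top charset
instance (input_xored : List Int) (test_key_len : Int) (check_top : Int) (charset : List Int) (out : List (List Int)) : Decidable (Spec_smart_xorkeys_top_printable input_xored test_key_len check_top charset out) := by unfold Spec_smart_xorkeys_top_printable; infer_instance

-- ===== CLAIM (what is proved, stated in full; the proofs are below) =====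
def Claim_equal_smart_xorkeys_top_printable : Prop := ∀ (input_xored : List Int) (test_key_len : Int) (check_top : Int) (charset : List Int), Dom_smart_xorkeys_top_printable input_xored test_key_len check_top charset → Pre_smart_xorkeys_top_printable input_xored test_key_len check_top charset → Spec_smart_xorkeys_top_printable input_xored test_key_len check_top charset (smart_xorkeys_top_printable input_xored test_key_len check_top charset)

-- ===== LEMMAS AND PROOFS =====

-- the common count: how many enumerated input positions land on key slot c and decode into charset with key k
def pvCnt (xs : List Int) (L : Int) (chs : List Int) (c : Nat) (k : Int) : Int :=
  ((PySem.List.enumerate xs 0).map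
    (fun p => if (PySem.Int.mod p.1 L).toNat = c ∧ chs.contains (PySem.Int.bxor p.2 k) then (1 : Int) else 0)).sum

-- xor cancellation (Python ^ on arbitrary ints)
theorem pv_nat_xor_cancel (x y : Nat) : x ^^^ (x ^^^ y) = y := by
  rw [← Nat.xor_assoc, Nat.xor_self, Nat.zero_xor]

theorem pv_bxor_cancel (a b : Int) : PySem.Int.bxor a (PySem.Int.bxor a b) = b := by
  unfold PySem.Int.bxor
  rcases (by omega : 0 ≤ a ∨ a < 0) with ha | ha <;> rcases (by omega : 0 ≤ b ∨ b < 0) with hb | hb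
  · simp [ha, hb, pv_nat_xor_cancel, Int.toNat_of_nonneg hb]
  · have h1 : ¬ (0 ≤ -(↑(a.toNat ^^^ (-b - 1).toNat) : Int) - 1) := by
      have := Int.natCast_nonneg (a.toNat ^^^ (-b - 1).toNat); omega
    simp only [if_pos ha, if_neg (by omega : ¬ (0 ≤ b)), if_neg h1]
    have h2 : (-(-(↑(a.toNat ^^^ (-b - 1).toNat) : Int) - 1) - 1).toNat = a.toNat ^^^ (-b - 1).toNat := by
      omega
    rw [h2, pv_nat_xor_cancel]
    omega
  · have h1 : ¬ (0 ≤ -(↑((-a - 1).toNat ^^^ b.toNat) : Int) - 1) := by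
      have := Int.natCast_nonneg ((-a - 1).toNat ^^^ b.toNat); omega
    simp only [if_neg (by omega : ¬ (0 ≤ a)), if_pos hb, if_neg h1]
    have h2 : (-(-(↑((-a - 1).toNat ^^^ b.toNat) : Int) - 1) - 1).toNat = (-a - 1).toNat ^^^ b.toNat := by
      omega
    rw [h2, pv_nat_xor_cancel]
    omega
  · simp only [if_neg (by omega : ¬ (0 ≤ a)), if_neg (by omega : ¬ (0 ≤ b)),
      if_pos (Int.natCast_nonneg ((-a - 1).toNat ^^^ (-b - 1).toNat))]
    rw [Int.toNat_natCast, pv_nat_xor_cancel]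
    omega

-- fold of modifies: length
theorem pv_foldl_modify_length {β γ : Type} (l : List β) (s0 : List γ) (idx : β → Nat) (g : β → γ → γ) :
    (l.foldl (fun s x => s.modify (idx x) (g x)) s0).length = s0.length := by
  induction l generalizing s0 with
  | nil => rfl
  | cons x l ih => simpa using ih (s0.modify (idx x) (g x))

-- fold of modifies, pointwise: only hits at the same index matter
theorem pv_foldl_modify_getElem? {β γ : Type} (l : List β) (s0 : List γ) (idx : β → Nat) (g : β → γ → γ) (k : Nat) :
    (l.foldl (fun s x => s.modify (idx x) (g x)) s0)[k]? =
      s0[k]?.map (fun v => (l.filter (fun x => idx x == k)).foldl (fun v x => g x v) v) := by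
  induction l generalizing s0 with
  | nil => cases h : s0[k]? <;> simp [h]
  | cons x l ih =>
      simp only [List.foldl_cons, List.filter_cons, ih]
      by_cases h : idx x = k
      · simp [h]; cases s0[k]? <;> rfl
      · simp [h]

-- Array counterparts (Python lists are O(1)-indexed; the ports keep the count tables as Arrays)
theorem pv_array_modify_id {γ : Type} (a : Array γ) (i : Nat) : a.modify i (fun x => x) = a := by
  apply Array.ext_getElem?
  intro j
  rw [Array.getElem?_modify]
  split <;> simp
theorem pv_array_modify_modify {γ : Type} (a : Array γ) (i : Nat) (f g : γ → γ) :
    (a.modify i f).modify i g = a.modify i (fun x => g (f x)) := by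
  apply Array.ext_getElem?
  intro j
  rw [Array.getElem?_modify, Array.getElem?_modify, Array.getElem?_modify]
  split <;> simp [Option.map_map]
  rfl
-- Array twins of the fold lemmas
theorem pv_foldl_modify_getElem?A {β γ : Type} (l : List β) (s0 : Array γ) (idx : β → Nat) (g : β → γ → γ) (k : Nat) :
    (l.foldl (fun s x => s.modify (idx x) (g x)) s0)[k]? =
      s0[k]?.map (fun v => (l.filter (fun x => idx x == k)).foldl (fun v x => g x v) v) := by
  induction l generalizing s0 with
  | nil => cases h : s0[k]? <;> simp [h]
  | cons x l ih =>
      simp only [List.foldl_cons, List.filter_cons, ih, Array.getElem?_modify]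
      by_cases h : idx x = k
      · simp [h]; cases s0[k]? <;> rfl
      · simp [h]
theorem pv_foldl_modify_ite_getElem?A {β : Type} (l : List β) (s0 : Array Int)
    (P : β → Prop) [DecidablePred P] (idx : β → Nat) (w : β → Int) (k : Nat) :
    (l.foldl (fun s x => if P x then s.modify (idx x) (fun v => v + w x) else s) s0)[k]? =
      s0[k]?.map (fun v => v + (l.map (fun x => if P x ∧ idx x = k then w x else 0)).sum) := by
  induction l generalizing s0 with
  | nil => cases h : s0[k]? <;> simp [h]
  | cons x l ih =>
      simp only [List.foldl_cons, List.map_cons, List.sum_cons]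
      by_cases hp : P x
      · rw [if_pos hp, ih, Array.getElem?_modify]
        by_cases h : idx x = k
        · simp only [h, if_pos rfl]
          cases s0[k]? with
          | none => rfl
          | some v => simp [hp, add_assoc]
        · simp [h, hp]
      · rw [if_neg hp, ih]
        have h1 : (if P x ∧ idx x = k then w x else 0) = 0 := if_neg (by tauto)
        simp [h1]
theorem pv_foldl_if_modify_sameA {β γ : Type} (l : List β) (T : Array γ) (r : Nat)
    (P : β → Prop) [DecidablePred P] (f : β → γ → γ) :
    l.foldl (fun T q => if P q then T.modify r (f q) else T) T =
      T.modify r (fun row => l.foldl (fun row q => if P q then f q row else row) row) := by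
  induction l generalizing T with
  | nil => exact (pv_array_modify_id T r).symm
  | cons q l ih =>
      by_cases hp : P q
      · simp only [List.foldl_cons, if_pos hp, ih, pv_array_modify_modify]
      · simp [hp, ih]
theorem pv_foldl_pointwiseA {β : Type} (l : List β) (G : β → Array Int → Array Int)
    (ind : β → Int) (k : Nat)
    (h : ∀ x ∈ l, ∀ s : Array Int, (G x s)[k]? = s[k]?.map (fun v => v + ind x)) (s0 : Array Int) :
    (l.foldl (fun s x => G x s) s0)[k]? = s0[k]?.map (fun v => v + (l.map ind).sum) := by
  induction l generalizing s0 with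
  | nil => cases h' : s0[k]? <;> simp [h']
  | cons x l ih =>
      simp only [List.foldl_cons, List.map_cons, List.sum_cons]
      rw [ih (fun y hy => h y (by simp [hy])), h x (by simp)]
      cases s0[k]? <;> simp [add_assoc]

-- enumerate of range(0,n) is the list of pairs (j, j)
theorem pv_enum_range (n : Nat) :
    PySem.List.enumerate (PySem.List.pyRange 0 n) 0 =
      (PySem.List.pyRange 0 n).map (fun j => (j, j)) := by
  induction n with
  | zero => simp
  | succ n ih =>
      have hcast : ((n + 1 : Nat) : Int) = (n : Int) + 1 := by push_cast; ring
      rw [hcast, PySem.List.pyRange_one_succ_right (by positivity), PySem.List.enumerate_append,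
        List.map_append, ih]
      simp [PySem.List.length_pyRange_one, PySem.List.enumerate]

-- single-hit sum over a Nodup list
theorem pv_sum_ite_single {α : Type} [DecidableEq α] (l : List α) (hnd : l.Nodup) (a : α) (w : α → Int) :
    (l.map (fun x => if x = a then w x else 0)).sum = if a ∈ l then w a else 0 := by
  induction l with
  | nil => simp
  | cons x l ih =>
      simp only [List.nodup_cons] at hnd
      by_cases hx : x = a
      · subst hx
        simp [ih hnd.2, hnd.1]
      · have : ¬ a = x := fun h => hx h.symm
        simp only [List.map_cons, List.sum_cons, if_neg hx, ih hnd.2, List.mem_cons]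
        simp [this]

-- sum of filtered indicators as one indicator sum
theorem pv_sum_filter_ite {β : Type} (l : List β) (q : β → Bool) (P : β → Prop) [DecidablePred P] (w : β → Int) :
    (((l.filter q).map (fun x => if P x then w x else 0)).sum) =
      ((l.map (fun x => if q x = true ∧ P x then w x else 0)).sum) := by
  induction l with
  | nil => rfl
  | cons x l ih =>
      by_cases hq : q x = true
      · by_cases hp : P x <;> simp [List.filter_cons, hq, hp, ih]
      · simp [List.filter_cons, hq, ih]

-- sum over a Nodup superset of weighted counts = indicator sum over the multiset
theorem pv_sum_count_dedup (vs dv : List Int) (hnd : dv.Nodup) (hsub : ∀ v ∈ vs, v ∈ dv)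
    (Q : Int → Prop) [DecidablePred Q] :
    ((dv.map (fun v => if Q v then (vs.count v : Int) else 0)).sum) =
      ((vs.map (fun v => if Q v then (1 : Int) else 0)).sum) := by
  induction vs with
  | nil => simp
  | cons x vs ih =>
      have hx : x ∈ dv := hsub x (by simp)
      have hsub' : ∀ v ∈ vs, v ∈ dv := fun v hv => hsub v (by simp [hv])
      have step : ∀ v ∈ dv, (if Q v then ((x :: vs).count v : Int) else 0)
          = (if Q v then (vs.count v : Int) else 0)
            + (if v = x then (if Q v then (1 : Int) else 0) else 0) := by
        intro v _
        by_cases hvx : v = x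
        · subst hvx
          by_cases hq : Q v <;> simp [hq, List.count_cons]
        · have hxv : ¬ x = v := fun h => hvx h.symm
          by_cases hq : Q v <;> simp [hq, hvx, hxv, List.count_cons]
      rw [List.map_congr_left step, PySem.List.sum_map_add_int, ih hsub',
        pv_sum_ite_single dv hnd x (fun v => if Q v then (1 : Int) else 0)]
      simp [hx]
      omega

-- insertBy only looks at `before` on the inserted element and list members
theorem pv_insertBy_congr {α : Type} (p q : α → α → Bool) (x : α) (ys : List α)
    (h : ∀ b ∈ ys, p x b = q x b) :
    PySem.List.insertBy p x ys = PySem.List.insertBy q x ys := by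
  induction ys with
  | nil => rfl
  | cons y ys ih =>
      simp only [PySem.List.insertBy]
      rw [h y (by simp)]
      by_cases hb : q x y = true
      · simp [hb]
      · simp only [Bool.not_eq_true] at hb
        simp [hb, ih (fun b hb' => h b (by simp [hb']))]

theorem pv_foldl_insertBy_congr_aux {α : Type} (l : List α) (S : List α) (p q : α → α → Bool)
    (hpq : ∀ a ∈ S, ∀ b ∈ S, p a b = q a b) (hl : ∀ a ∈ l, a ∈ S) :
    ∀ acc : List α, (∀ b ∈ acc, b ∈ S) →
      l.foldl (fun acc x => PySem.List.insertBy p x acc) acc =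
      l.foldl (fun acc x => PySem.List.insertBy q x acc) acc := by
  induction l with
  | nil => intro acc _; rfl
  | cons x l ih =>
      intro acc hacc
      have hx : x ∈ S := hl x (by simp)
      have heq : PySem.List.insertBy p x acc = PySem.List.insertBy q x acc :=
        pv_insertBy_congr p q x acc (fun b hb => hpq x hx b (hacc b hb))
      simp only [List.foldl_cons, heq]
      apply ih (fun a ha => hl a (by simp [ha]))
      intro b hb
      rcases (PySem.List.mem_insertBy q x b acc).mp hb with h | h
      · exact h ▸ hx
      · exact hacc b h

theorem pv_foldl_insertBy_congr {α : Type} (l : List α) (p q : α → α → Bool)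
    (h : ∀ a ∈ l, ∀ b ∈ l, p a b = q a b) :
    l.foldl (fun acc x => PySem.List.insertBy p x acc) [] =
      l.foldl (fun acc x => PySem.List.insertBy q x acc) [] :=
  pv_foldl_insertBy_congr_aux l l p q h (fun _ ha => ha) [] (by simp)

-- sorted with reverse=True equals sorted with the negated key
theorem pv_sorted_rev_eq_neg {α : Type} (xs : List α) (key : α → Int) :
    PySem.List.sorted xs key true = PySem.List.sorted xs (fun x => -(key x)) false := by
  rw [PySem.List.sorted_rev_eq_foldl_insertBy, PySem.List.sorted_eq_foldl_insertBy]
  apply pv_foldl_insertBy_congr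
  intro a _ b _
  rw [decide_eq_decide]
  omega

-- key congruence for sorted
theorem pv_sorted_congr {α : Type} (xs : List α) (f g : α → Int) (r : Bool)
    (h : ∀ x ∈ xs, f x = g x) :
    PySem.List.sorted xs f r = PySem.List.sorted xs g r := by
  cases r
  · rw [PySem.List.sorted_eq_foldl_insertBy, PySem.List.sorted_eq_foldl_insertBy]
    exact pv_foldl_insertBy_congr xs _ _ (fun a ha b hb => by rw [h a ha, h b hb])
  · rw [PySem.List.sorted_rev_eq_foldl_insertBy, PySem.List.sorted_rev_eq_foldl_insertBy]
    exact pv_foldl_insertBy_congr xs _ _ (fun a ha b hb => by rw [h a ha, h b hb])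

-- A's srt/top_list pair loop is a map
theorem pv_pair_append_last {α : Type} (l : List α) (f : α → List Int) (g : List Int → List Int)
    (acc1 : List (List Int)) (acc2 : List (List Int)) :
    l.foldl (fun st c =>
        (st.1 ++ [f c], st.2 ++ [g (PySem.List.pyGetD (st.1 ++ [f c]) (-1) [])])) (acc1, acc2) =
      (acc1 ++ l.map f, acc2 ++ l.map (fun c => g (f c))) := by
  induction l generalizing acc1 acc2 with
  | nil => simp
  | cons c l ih =>
      simp only [List.foldl_cons, ih]
      have : PySem.List.pyGetD (acc1 ++ [f c]) (-1) [] = f c := by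
        simp [PySem.List.pyGetD, PySem.List.pyGet?, PySem.List.pyIdx?]
      simp [this]

-- the two cartesian-product folds agree
theorem pv_product_eq (l : List (List Int)) :
    l.foldl (fun acc xs => acc.flatMap (fun t => xs.map (fun x => t ++ [x]))) [[]] =
      l.reverse.foldl (fun prod tops => tops.flatMap (fun k => prod.map (fun t => k :: t))) [[]] := by
  rw [List.foldl_reverse]
  have aux : ∀ (l : List (List Int)) (acc : List (List Int)),
      l.foldl (fun acc xs => acc.flatMap (fun t => xs.map (fun x => t ++ [x]))) acc =
        acc.flatMap (fun t =>
          (l.foldr (fun tops prod => tops.flatMap (fun k => prod.map (fun t => k :: t))) [[]]).map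
            (fun r => t ++ r)) := by
    intro l
    induction l with
    | nil => intro acc; simp
    | cons xs l ih =>
        intro acc
        simp only [List.foldl_cons, List.foldr_cons, ih]
        simp only [List.flatMap_map, List.map_flatMap, List.map_map, Function.comp,
          List.flatMap_assoc]
        congr 1
        funext t
        congr 1
        funext x
        congr 1
        funext r
        simp
  rw [aux]
  simp


-- ===== stage characterizations =====

theorem pv_A_row (chs : List Int) (ch : Int) (k : Nat) (hk : k < 256) (s : Array Int) :
    ((PySem.List.enumerate (PySem.List.pyRange 0 256) 0).foldl
        (fun row q => if chs.contains (PySem.Int.bxor ch q.2) then row.modify q.1.toNat (fun x => x + 1) else row) s)[k]? =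
      s[k]?.map (fun v => v + (if chs.contains (PySem.Int.bxor ch (k : Int)) then (1 : Int) else 0)) := by
  rw [show ((256 : Int)) = ((256 : Nat) : Int) by norm_num, pv_enum_range 256]
  rw [List.foldl_map]
  rw [pv_foldl_modify_ite_getElem?A _ s (fun j => chs.contains (PySem.Int.bxor ch j) = true)
      (fun j => j.toNat) (fun _ => 1) k]
  congr 1
  have hmap : ∀ j ∈ PySem.List.pyRange 0 ((256 : Nat) : Int),
      (if chs.contains (PySem.Int.bxor ch j) = true ∧ j.toNat = k then (1 : Int) else 0) =
      (if j = (k : Int) then (if chs.contains (PySem.Int.bxor ch j) = true then (1 : Int) else 0) else 0) := by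
    intro j hj
    rcases PySem.List.mem_pyRange_one.mp hj with ⟨h0, _⟩
    by_cases hjk : j = (k : Int)
    · subst hjk
      simp
    · have : ¬ j.toNat = k := by omega
      simp [this, hjk]
  rw [List.map_congr_left hmap,
    pv_sum_ite_single _ (PySem.List.nodup_pyRange_one 0 _) (k : Int)
      (fun j => if chs.contains (PySem.Int.bxor ch j) = true then (1 : Int) else 0)]
  have hmem : (k : Int) ∈ PySem.List.pyRange 0 ((256 : Nat) : Int) :=
    PySem.List.mem_pyRange_one.mpr (by constructor <;> [positivity; exact_mod_cast hk])
  simp [hmem, hk]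

theorem pv_A_table (xs chs : List Int) (L : Int) (hL : 0 < L) (c : Nat) (hc : c < L.toNat)
    (k : Nat) (hk : k < 256) :
    (((PySem.List.enumerate xs 0).foldl
        (fun T p =>
          (PySem.List.enumerate (PySem.List.pyGetD
              ((PySem.List.pyRange 0 L).map (fun _ => PySem.Set.ofList (PySem.List.pyRange 0 256)))
              (PySem.Int.mod p.1 L) []) 0).foldl
            (fun T q =>
              if chs.contains (PySem.Int.bxor p.2 q.2) then
                T.modify (PySem.Int.mod p.1 L).toNat (fun row => row.modify q.1.toNat (fun x => x + 1))
              else T) T)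
        (((PySem.List.pyRange 0 L).map (fun _ => Array.replicate 256 (0 : Int))).toArray)).getD c #[]).getD k 0
      = pvCnt xs L chs c (k : Int) := by
  have hLcast : L = ((L.toNat : Nat) : Int) := (Int.toNat_of_nonneg hL.le).symm
  -- rewrite the outer step into single-modify form
  have hfun : (fun (T : Array (Array Int)) (p : Int × Int) =>
      (PySem.List.enumerate (PySem.List.pyGetD
          ((PySem.List.pyRange 0 L).map (fun _ => PySem.Set.ofList (PySem.List.pyRange 0 256)))
          (PySem.Int.mod p.1 L) []) 0).foldl
        (fun T q =>
          if chs.contains (PySem.Int.bxor p.2 q.2) then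
            T.modify (PySem.Int.mod p.1 L).toNat (fun row => row.modify q.1.toNat (fun x => x + 1))
          else T) T) =
      (fun T p => T.modify (PySem.Int.mod p.1 L).toNat
        (fun row => (PySem.List.enumerate (PySem.List.pyRange 0 256) 0).foldl
          (fun row q => if chs.contains (PySem.Int.bxor p.2 q.2) then row.modify q.1.toNat (fun x => x + 1) else row) row)) := by
    funext T p
    have hget : ∀ m : Int, 0 ≤ m → m < L → PySem.List.pyGetD
        ((PySem.List.pyRange 0 L).map (fun _ => PySem.Set.ofList (PySem.List.pyRange 0 256)))
        m [] = PySem.Set.ofList (PySem.List.pyRange 0 256) := by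
      intro m hm0 hm1
      rw [show m = (((m.toNat : Nat)) : Int) by omega]
      conv_lhs => rw [hLcast]
      exact PySem.List.pyGetD_map_pyRange _ _ _ _ (by omega)
    rw [hget _ (PySem.Int.mod_nonneg p.1 hL) (PySem.Int.mod_lt p.1 hL),
      PySem.Set.ofList_eq_self_of_nodup _ (PySem.List.nodup_pyRange_one 0 256)]
    exact pv_foldl_if_modify_sameA _ T _ (fun (q : Int × Int) => chs.contains (PySem.Int.bxor p.2 q.2) = true) _
  rw [hfun]
  -- unfold the two in-range Array lookups
  rw [Array.getD_eq_getD_getElem?, Array.getD_eq_getD_getElem?]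
  rw [pv_foldl_modify_getElem?A (PySem.List.enumerate xs 0) _ (fun p => (PySem.Int.mod p.1 L).toNat)
    (fun (p : Int × Int) (row : Array Int) => (PySem.List.enumerate (PySem.List.pyRange 0 256) 0).foldl
      (fun (row : Array Int) (q : Int × Int) => if chs.contains (PySem.Int.bxor p.2 q.2) then row.modify q.1.toNat (fun x => x + 1) else row) row) c]
  have hs0 : (((PySem.List.pyRange 0 L).map (fun _ => Array.replicate 256 (0 : Int))).toArray)[c]? =
      some (Array.replicate 256 (0 : Int)) := by
    rw [List.getElem?_toArray, List.getElem?_map, PySem.List.getElem?_pyRange_one,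
      if_pos (show c < (L - 0).toNat by omega), Option.map_some]
  rw [hs0, Option.map_some, Option.getD_some]
  -- now the row fold, pointwise at k
  rw [pv_foldl_pointwiseA _ _
      (fun p => if chs.contains (PySem.Int.bxor p.2 (k : Int)) then (1 : Int) else 0) k
      (fun p _ s => pv_A_row chs p.2 k hk s)]
  rw [Array.getElem?_replicate, if_pos hk, Option.map_some, Option.getD_some, zero_add]
  rw [pv_sum_filter_ite (PySem.List.enumerate xs 0) (fun x => (PySem.Int.mod x.1 L).toNat == c)
    (fun p => chs.contains (PySem.Int.bxor p.2 (k : Int)) = true) (fun _ => (1 : Int))]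
  simp [pvCnt, beq_iff_eq]

theorem pv_B_row (cs : List Int) (hnd : cs.Nodup) (v m : Int) (k : Nat) (hk : k < 256) (s : Array Int) :
    (cs.foldl (fun counts c =>
        if 0 ≤ PySem.Int.bxor v c ∧ PySem.Int.bxor v c < 256 then
          counts.modify (PySem.Int.bxor v c).toNat (fun x => x + m) else counts) s)[k]? =
      s[k]?.map (fun x => x + (if cs.contains (PySem.Int.bxor v (k : Int)) then m else 0)) := by
  rw [pv_foldl_modify_ite_getElem?A cs s (fun c => 0 ≤ PySem.Int.bxor v c ∧ PySem.Int.bxor v c < 256)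
    (fun c => (PySem.Int.bxor v c).toNat) (fun _ => m) k]
  congr 1
  have hmap : ∀ c ∈ cs,
      (if (0 ≤ PySem.Int.bxor v c ∧ PySem.Int.bxor v c < 256) ∧ (PySem.Int.bxor v c).toNat = k then m else 0) =
      (if c = PySem.Int.bxor v (k : Int) then (fun _ => m) c else 0) := by
    intro c _
    by_cases hc : c = PySem.Int.bxor v (k : Int)
    · subst hc
      rw [if_pos, if_pos rfl]
      have hx : PySem.Int.bxor v (PySem.Int.bxor v (k : Int)) = (k : Int) := pv_bxor_cancel v _
      refine ⟨⟨by omega, by rw [hx]; exact_mod_cast hk⟩, by omega⟩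
    · rw [if_neg hc, if_neg]
      rintro ⟨⟨h0, _⟩, h2⟩
      apply hc
      have : PySem.Int.bxor v c = (k : Int) := by omega
      rw [← this, pv_bxor_cancel]
  rw [List.map_congr_left hmap, pv_sum_ite_single cs hnd (PySem.Int.bxor v (k : Int)) (fun _ => m)]
  by_cases hmem : PySem.Int.bxor v (k : Int) ∈ cs <;>
    simp [hmem, List.contains_eq_mem]

theorem pv_B_counts (vs cs : List Int) (hnd : cs.Nodup) (k : Nat) (hk : k < 256) :
    (((PySem.Dict.counter vs).items.foldl
        (fun counts vm =>
          cs.foldl (fun counts c =>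
            if 0 ≤ PySem.Int.bxor vm.1 c ∧ PySem.Int.bxor vm.1 c < 256 then
              counts.modify (PySem.Int.bxor vm.1 c).toNat (fun x => x + vm.2) else counts) counts)
        (Array.replicate 256 (0 : Int))).getD k 0) =
      (vs.map (fun v => if cs.contains (PySem.Int.bxor v (k : Int)) then (1 : Int) else 0)).sum := by
  rw [Array.getD_eq_getD_getElem?]
  rw [pv_foldl_pointwiseA _ _
      (fun vm => if cs.contains (PySem.Int.bxor vm.1 (k : Int)) then vm.2 else 0) k
      (fun vm _ s => pv_B_row cs hnd vm.1 vm.2 k hk s)]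
  rw [Array.getElem?_replicate, if_pos hk, Option.map_some, Option.getD_some, zero_add]
  rw [PySem.Dict.items_counter, List.map_map]
  have : ((fun vm : Int × Int => if cs.contains (PySem.Int.bxor vm.1 (k : Int)) then vm.2 else 0) ∘
      (fun v => (v, (vs.count v : Int)))) =
      (fun v => if cs.contains (PySem.Int.bxor v (k : Int)) = true then (vs.count v : Int) else 0) := by
    funext v; rfl
  rw [this, pv_sum_count_dedup vs (PySem.Set.ofList vs) (PySem.Set.nodup_ofList vs)
    (fun v hv => (PySem.Set.mem_ofList vs v).mpr hv)
    (fun v => cs.contains (PySem.Int.bxor v (k : Int)) = true)]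

theorem pv_B_hists (xs : List Int) (L : Int) (hL : 0 < L) (c : Nat) (hc : c < L.toNat) :
    ((PySem.List.enumerate xs 0).foldl
      (fun hs p =>
        hs.modify (PySem.Int.mod p.1 L).toNat (fun h => h.insert p.2 (h.getD p.2 0 + 1)))
      ((PySem.List.pyRange 0 (max L 0)).map (fun _ => (PySem.Dict.empty : PySem.Dict Int Int))))[c]? =
      some (PySem.Dict.counter
        (((PySem.List.enumerate xs 0).filter (fun p => (PySem.Int.mod p.1 L).toNat == c)).map (·.2))) := by
  rw [pv_foldl_modify_getElem? (PySem.List.enumerate xs 0) _ (fun p => (PySem.Int.mod p.1 L).toNat)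
    (fun (p : Int × Int) (h : PySem.Dict Int Int) => h.insert p.2 (h.getD p.2 0 + 1)) c]
  have hmax : max L 0 = L := by omega
  have hs0 : ((PySem.List.pyRange 0 (max L 0)).map (fun _ => (PySem.Dict.empty : PySem.Dict Int Int)))[c]? =
      some PySem.Dict.empty := by
    rw [List.getElem?_map, PySem.List.getElem?_pyRange_one,
      if_pos (show c < (max L 0 - 0).toNat by omega), Option.map_some]
  rw [hs0, Option.map_some]
  rw [← List.foldl_map (f := (·.2 : Int × Int → Int))
    (g := fun (d : PySem.Dict Int Int) (x : Int) => d.insert x (d.getD x 0 + 1)),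
    PySem.Dict.foldl_insert_getD_add_one_eq_counter]


theorem pv_cs_contains (chs : List Int) (x : Int) :
    (PySem.Set.ofList chs).contains x = chs.contains x := by
  simp [List.contains_eq_mem, PySem.Set.mem_ofList]

theorem pv_B_sum_eq_cnt (xs chs : List Int) (L : Int) (c : Nat) (k : Int) :
    (((((PySem.List.enumerate xs 0).filter (fun p => (PySem.Int.mod p.1 L).toNat == c)).map (·.2)).map
      (fun v => if (PySem.Set.ofList chs).contains (PySem.Int.bxor v k) then (1 : Int) else 0)).sum)
    = pvCnt xs L chs c k := by
  rw [List.map_map]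
  have hfun : ((fun v => if (PySem.Set.ofList chs).contains (PySem.Int.bxor v k) then (1 : Int) else 0) ∘
      (·.2 : Int × Int → Int)) =
      (fun p : Int × Int => if chs.contains (PySem.Int.bxor p.2 k) = true then (1 : Int) else 0) := by
    funext p
    simp [Function.comp, pv_cs_contains]
  rw [hfun, pv_sum_filter_ite (PySem.List.enumerate xs 0) (fun x => (PySem.Int.mod x.1 L).toNat == c)
    (fun p => chs.contains (PySem.Int.bxor p.2 k) = true) (fun _ => (1 : Int))]
  simp [pvCnt, beq_iff_eq]

-- per key position: A's reverse-sorted key ranking equals B's negated-key ranking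
theorem pv_sorted_pos (xs chs : List Int) (L : Int) (hL : 0 < L) (c : Nat) (hc : c < L.toNat) :
    PySem.List.sorted (PySem.List.pyRange 0 256)
      (fun k => (((PySem.List.enumerate xs 0).foldl
          (fun T p =>
            (PySem.List.enumerate (PySem.List.pyGetD
                ((PySem.List.pyRange 0 L).map (fun _ => PySem.Set.ofList (PySem.List.pyRange 0 256)))
                (PySem.Int.mod p.1 L) []) 0).foldl
              (fun T q =>
                if chs.contains (PySem.Int.bxor p.2 q.2) then
                  T.modify (PySem.Int.mod p.1 L).toNat (fun row => row.modify q.1.toNat (fun x => x + 1))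
                else T) T)
          (((PySem.List.pyRange 0 L).map (fun _ => Array.replicate 256 (0 : Int))).toArray)).getD
          ((c : Int)).toNat #[]).getD k.toNat 0) true =
    PySem.List.sorted (PySem.List.pyRange 0 256)
      (fun k => -(((PySem.Dict.counter
            (((PySem.List.enumerate xs 0).filter (fun p => (PySem.Int.mod p.1 L).toNat == c)).map (·.2))).items.foldl
          (fun counts vm =>
            (PySem.Set.ofList chs).foldl (fun counts cc =>
              if 0 ≤ PySem.Int.bxor vm.1 cc ∧ PySem.Int.bxor vm.1 cc < 256 then
                counts.modify (PySem.Int.bxor vm.1 cc).toNat (fun x => x + vm.2) else counts) counts)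
          (Array.replicate 256 (0 : Int))).getD k.toNat 0)) false := by
  rw [pv_sorted_rev_eq_neg, Int.toNat_natCast]
  apply pv_sorted_congr
  intro k hk
  obtain ⟨hk0, hk1⟩ := PySem.List.mem_pyRange_one.mp hk
  rw [pv_A_table xs chs L hL c hc k.toNat (by omega),
    pv_B_counts _ _ (PySem.Set.nodup_ofList chs) k.toNat (by omega)]
  exact congrArg Neg.neg (pv_B_sum_eq_cnt xs chs L c ((k.toNat : Nat) : Int)).symm

-- ===== VERDICT (by name: the statement is the Claim_ definition above) =====
theorem smart_xorkeys_top_printable_spec : Claim_equal_smart_xorkeys_top_printable := by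
  intro xs L ct chs _ hpre
  unfold Spec_smart_xorkeys_top_printable
  unfold smart_xorkeys_top_printable smart_xorkeys_top_printable_alt
  dsimp only
  by_cases hL : 0 < L
  · -- main case: test_key_len > 0
    rw [pv_pair_append_last (PySem.List.pyRange 0 L)
      (fun c => PySem.List.sorted (PySem.List.pyRange 0 256)
        (fun k => (((PySem.List.enumerate xs 0).foldl
            (fun T p =>
              (PySem.List.enumerate (PySem.List.pyGetD
                  ((PySem.List.pyRange 0 L).map (fun _ => PySem.Set.ofList (PySem.List.pyRange 0 256)))
                  (PySem.Int.mod p.1 L) []) 0).foldl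
                (fun T q =>
                  if chs.contains (PySem.Int.bxor p.2 q.2) then
                    T.modify (PySem.Int.mod p.1 L).toNat (fun row => row.modify q.1.toNat (fun x => x + 1))
                  else T) T)
            (((PySem.List.pyRange 0 L).map (fun _ => Array.replicate 256 (0 : Int))).toArray)).getD
            c.toNat #[]).getD k.toNat 0) true)
      (fun xs' => PySem.List.slice xs' none (some ct)) [] []]
    rw [PySem.List.foldl_append_singleton_eq_map]
    dsimp only
    have htop :
        (PySem.List.pyRange 0 L).map (fun c =>
          PySem.List.slice (PySem.List.sorted (PySem.List.pyRange 0 256)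
            (fun k => (((PySem.List.enumerate xs 0).foldl
                (fun T p =>
                  (PySem.List.enumerate (PySem.List.pyGetD
                      ((PySem.List.pyRange 0 L).map (fun _ => PySem.Set.ofList (PySem.List.pyRange 0 256)))
                      (PySem.Int.mod p.1 L) []) 0).foldl
                    (fun T q =>
                      if chs.contains (PySem.Int.bxor p.2 q.2) then
                        T.modify (PySem.Int.mod p.1 L).toNat (fun row => row.modify q.1.toNat (fun x => x + 1))
                      else T) T)
                (((PySem.List.pyRange 0 L).map (fun _ => Array.replicate 256 (0 : Int))).toArray)).getD
                c.toNat #[]).getD k.toNat 0) true) none (some ct)) =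
        ((PySem.List.enumerate xs 0).foldl
          (fun hs p =>
            hs.modify (PySem.Int.mod p.1 L).toNat (fun h => h.insert p.2 (h.getD p.2 0 + 1)))
          ((PySem.List.pyRange 0 (max L 0)).map (fun _ => (PySem.Dict.empty : PySem.Dict Int Int)))).map
          (fun h =>
            PySem.List.slice (PySem.List.sorted (PySem.List.pyRange 0 256)
              (fun k => -((h.items.foldl
                  (fun counts vm =>
                    (PySem.Set.ofList chs).foldl (fun counts cc =>
                      if 0 ≤ PySem.Int.bxor vm.1 cc ∧ PySem.Int.bxor vm.1 cc < 256 then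
                        counts.modify (PySem.Int.bxor vm.1 cc).toNat (fun x => x + vm.2) else counts) counts)
                  (Array.replicate 256 (0 : Int))).getD k.toNat 0)) false) none (some ct)) := by
      apply List.ext_getElem?
      intro i
      by_cases hi : i < L.toNat
      · rw [List.getElem?_map, List.getElem?_map, PySem.List.getElem?_pyRange_one,
          if_pos (show i < (L - 0).toNat by omega),
          pv_B_hists xs L hL i hi, Option.map_some, Option.map_some, zero_add,
          pv_sorted_pos xs chs L hL i hi]
      · rw [List.getElem?_map, List.getElem?_map, PySem.List.getElem?_pyRange_one,
          if_neg (show ¬ i < (L - 0).toNat by omega), List.getElem?_eq_none]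
        · rfl
        · rw [pv_foldl_modify_length, List.length_map, PySem.List.length_pyRange_one]
          omega
    rw [htop, pv_product_eq]
  · -- degenerate case: Pre_ forces input_xored = []
    have hxs : xs = [] := by
      rcases hpre with h | h
      · exact absurd h hL
      · exact h
    subst hxs
    rw [PySem.List.pyRange_one_eq_nil (by omega : L ≤ 0),
      PySem.List.pyRange_one_eq_nil (by omega : max L 0 ≤ 0)]
    rfl
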